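-- pv_equiv track=rewrite | github.com/jamartinec/proyecto_udea_v1 | src/combopt/shortest_paths/desrochers_soumis_1988/fijacion_etiquetas.py | reduce_to_pareto_frontier
-- ===== SOURCE A (Python) =====
-- def reduce_to_pareto_frontier(A):
--     # originalmente en shortes_path_basic.py
--     """ Find the Pareto frontier of an lex ordered list of pairs.
--
--     Given an ordered (Lex) list of n pairs, find the Pareto front (for a minimization problem) in O(n).
--     Search for efficient pairs by comparing the second coordinate, goint through the Pareto front as if
--     descending a staircase.
--
--     Args:
--         A: A list of n pairs (u,v) sorted in ascending Lex order.
--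
--     Returns:
--         A list containing the Pareto front from the original list A.
--
--     """
--     # La búsqueda cuesta O(n).
--     pareto = list()
--     (u, v) = A[0]
--     pareto.append((u, v))
--     actual = v
--
--     for j in range(1, len(A)):
--         if A[j][1] <= actual:
--             pareto.append(A[j])
--             actual = A[j][1]
--         else:
--             pass
--     return pareto
-- ===== SOURCE B (Python) =====
-- def reduce_to_pareto_frontier(A):
--     """Two-pass: build the prefix-minimum table of second coordinates,
--     then keep each pair whose second coordinate equals its prefix minimum."""
--     mins = []
--     m = None
--     for (_, v) in A:
--         m = v if m is None or v < m else m
--         mins.append(m)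
--     return [p for p, m in zip(A, mins) if p[1] == m]
-- ===== Notes on version B (the rewrite author's own statement) =====
-- stated objective: alternative
-- what changed: Replaces the single branching accumulator loop by two differently-shaped passes: one pass builds the prefix-minimum table of second coordinates, a second filtering pass keeps each pair whose second coordinate equals its prefix minimum.
import Mathlib
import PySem

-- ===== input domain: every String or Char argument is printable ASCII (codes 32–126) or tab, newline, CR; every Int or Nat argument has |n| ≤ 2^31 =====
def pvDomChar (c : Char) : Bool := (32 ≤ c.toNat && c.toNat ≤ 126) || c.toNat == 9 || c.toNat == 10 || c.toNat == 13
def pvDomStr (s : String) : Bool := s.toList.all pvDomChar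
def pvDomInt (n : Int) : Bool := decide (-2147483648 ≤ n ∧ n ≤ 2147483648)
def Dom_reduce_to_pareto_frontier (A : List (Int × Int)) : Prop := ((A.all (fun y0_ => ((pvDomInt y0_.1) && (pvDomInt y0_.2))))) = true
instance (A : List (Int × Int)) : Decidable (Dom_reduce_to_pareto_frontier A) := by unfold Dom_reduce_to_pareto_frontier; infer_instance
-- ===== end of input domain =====

-- B replaces A's single branching accumulator loop by two passes (prefix-minimum table, then a filter);
-- equivalence of the return values is proved on nonempty lists (A raises IndexError on []).

-- ===== PORT A =====
-- A[0] raises IndexError on the empty list: pyGet? returns none there; Pre_ excludes it.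
def reduce_to_pareto_frontier (A : List (Int × Int)) : List (Int × Int) :=
  match PySem.List.pyGet? A 0 with
  | none => []   -- unreachable under Pre_ (IndexError in Python)
  | some (u, v) =>
    let st := (PySem.List.pyRange 1 (PySem.List.len A) 1).foldl
      (fun (st : List (Int × Int) × Int) j =>
        let p := PySem.List.pyGetD A j (0, 0)
        if p.2 ≤ st.2 then (st.1 ++ [p], p.2) else st)
      ([(u, v)], v)
    st.1

-- ===== PORT B =====
-- first pass of Source B: the prefix-minimum table of second coordinates
def pvMins (A : List (Int × Int)) : List Int :=
  (A.foldl
    (fun (st : List Int × Option Int) p =>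
      let m := match st.2 with
        | none => p.2
        | some m => if p.2 < m then p.2 else m
      (st.1 ++ [m], some m))
    ([], none)).1

def reduce_to_pareto_frontier_alt (A : List (Int × Int)) : List (Int × Int) :=
  ((A.zip (pvMins A)).filter (fun pm => pm.1.2 == pm.2)).map Prod.fst

-- ===== PRECONDITION & SPEC =====
-- A raises IndexError on the empty list (A[0]); Pre_ excludes exactly that input.
def Pre_reduce_to_pareto_frontier (A : List (Int × Int)) : Prop := A ≠ []
instance (A : List (Int × Int)) : Decidable (Pre_reduce_to_pareto_frontier A) := by
  unfold Pre_reduce_to_pareto_frontier; infer_instance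
def pvWitness_reduce_to_pareto_frontier : (List (Int × Int)) := [(1, 3), (2, 2), (3, 4)]

def Spec_reduce_to_pareto_frontier (A : List (Int × Int)) (out : List (Int × Int)) : Prop :=
  out = reduce_to_pareto_frontier_alt A
instance (A : List (Int × Int)) (out : List (Int × Int)) : Decidable (Spec_reduce_to_pareto_frontier A out) := by
  unfold Spec_reduce_to_pareto_frontier; infer_instance

-- ===== CLAIM (what is proved, stated in full; the proofs are below) =====
def Claim_equal_reduce_to_pareto_frontier : Prop :=
  ∀ (A : List (Int × Int)), Dom_reduce_to_pareto_frontier A →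
    Pre_reduce_to_pareto_frontier A →
    Spec_reduce_to_pareto_frontier A (reduce_to_pareto_frontier A)


-- ===== LEMMAS AND PROOFS =====

-- the common recursive skeleton both loops compute: keep q iff q.2 ≤ current min
def pvKeep (m : Int) : List (Int × Int) → List (Int × Int)
  | [] => []
  | q :: r => if q.2 ≤ m then q :: pvKeep q.2 r else pvKeep m r

-- the prefix minima of the second coordinates, starting from current min m
def pvMinsFrom (m : Int) : List (Int × Int) → List Int
  | [] => []
  | q :: r => (if q.2 < m then q.2 else m) :: pvMinsFrom (if q.2 < m then q.2 else m) r

theorem foldlA_eq_keep (rest : List (Int × Int)) :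
    ∀ (acc : List (Int × Int)) (m : Int),
      (rest.foldl
        (fun (st : List (Int × Int) × Int) p =>
          if p.2 ≤ st.2 then (st.1 ++ [p], p.2) else st)
        (acc, m)).1 = acc ++ pvKeep m rest := by
  induction rest with
  | nil => intro acc m; simp [pvKeep]
  | cons q r ih =>
    intro acc m
    by_cases h : q.2 ≤ m
    · simp [List.foldl_cons, h, ih, pvKeep]
    · simp [List.foldl_cons, h, ih, pvKeep]

theorem foldlB_eq_minsFrom (rest : List (Int × Int)) :
    ∀ (acc : List Int) (m : Int),
      (rest.foldl
        (fun (st : List Int × Option Int) p =>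
          let m := match st.2 with
            | none => p.2
            | some m => if p.2 < m then p.2 else m
          (st.1 ++ [m], some m))
        (acc, some m)).1 = acc ++ pvMinsFrom m rest := by
  induction rest with
  | nil => intro acc m; simp [pvMinsFrom]
  | cons q r ih =>
    intro acc m
    simp only [List.foldl_cons, pvMinsFrom]
    rw [ih]
    simp

theorem pvMins_cons (p : Int × Int) (rest : List (Int × Int)) :
    pvMins (p :: rest) = p.2 :: pvMinsFrom p.2 rest := by
  unfold pvMins
  simp only [List.foldl_cons]
  rw [foldlB_eq_minsFrom]
  simp

theorem filter_zip_eq_keep (rest : List (Int × Int)) :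
    ∀ (m : Int),
      ((rest.zip (pvMinsFrom m rest)).filter (fun pm => pm.1.2 == pm.2)).map Prod.fst
        = pvKeep m rest := by
  induction rest with
  | nil => intro m; simp [pvMinsFrom, pvKeep]
  | cons q r ih =>
    intro m
    simp only [pvMinsFrom, pvKeep, List.zip_cons_cons, List.filter_cons]
    by_cases h : q.2 ≤ m
    · by_cases h' : q.2 < m
      · simp [h', h, ih]
      · have : q.2 = m := le_antisymm h (not_lt.mp h')
        simp [this, ih]
    · have h' : ¬ q.2 < m := fun hlt => h (le_of_lt hlt)
      have hne : ¬ (q.2 == m) = true := by simpa using fun he => h (le_of_eq he)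
      simp [h', hne, ih, if_neg h]

-- ===== VERDICT (by name: the statement is the Claim_ definition above) =====
theorem reduce_to_pareto_frontier_spec : Claim_equal_reduce_to_pareto_frontier := by
  intro A _ hPre
  unfold Spec_reduce_to_pareto_frontier
  match A with
  | [] => exact absurd rfl hPre
  | p :: rest =>
    unfold reduce_to_pareto_frontier reduce_to_pareto_frontier_alt
    rw [pvMins_cons]
    -- B side: the head pair always passes the filter (its prefix min is itself)
    have hB : (((p :: rest).zip (p.2 :: pvMinsFrom p.2 rest)).filter
        (fun pm => pm.1.2 == pm.2)).map Prod.fst = p :: pvKeep p.2 rest := by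
      simp only [List.zip_cons_cons, List.filter_cons]
      simp [filter_zip_eq_keep]
    rw [hB]
    -- A side
    have hget : PySem.List.pyGet? (p :: rest) 0 = some p := by
      simp [PySem.List.pyGet?, PySem.List.pyIdx?]
    rw [hget]
    have hfold := PySem.List.foldl_pyRange_pyGetD (xs := p :: rest) (a := 1) (d := ((0 : Int), (0 : Int)))
      (f := fun (st : List (Int × Int) × Int) q => if q.2 ≤ st.2 then (st.1 ++ [q], q.2) else st)
      (init := ([(p.1, p.2)], p.2)) (by norm_num)
    simp only [show ((1:Int).toNat) = 1 from rfl, List.drop_succ_cons, List.drop_zero] at hfold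
    simp only [hfold]
    rw [foldlA_eq_keep rest [(p.1, p.2)] p.2]
    simp
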